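-- pv_equiv track=rewrite | github.com/bbkyoo/Algorithm | 프로그래머스/programmus/PythonApplication1/Level1/정수제곱근판별.py | solution
-- ===== SOURCE A (Python) =====
-- def solution(n):
--     answer = -1
--
--     for i in range(1,n+1):
--         if i*i == n:
--             answer = i
--             break
--
--     if answer != -1:
--         answer += 1
--         answer = answer**2
--
--     return answer
-- ===== SOURCE B (Python) =====
-- def solution(n):
--     # Binary search for the integer square root (O(log n) vs A's linear scan).
--     if n < 1:
--         return -1
--     low, high = 1, n
--     while low <= high:
--         mid = (low + high) // 2
--         sq = mid * mid
--         if sq == n: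
--             return (mid + 1) ** 2
--         if sq < n:
--             low = mid + 1
--         else:
--             high = mid - 1
--     return -1
-- ===== Notes on version B (the rewrite author's own statement) =====
-- stated objective: faster
-- what changed: Replaces A's linear scan over range(1, n+1) with a binary search for the integer square root on [1, n].
import Mathlib
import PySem

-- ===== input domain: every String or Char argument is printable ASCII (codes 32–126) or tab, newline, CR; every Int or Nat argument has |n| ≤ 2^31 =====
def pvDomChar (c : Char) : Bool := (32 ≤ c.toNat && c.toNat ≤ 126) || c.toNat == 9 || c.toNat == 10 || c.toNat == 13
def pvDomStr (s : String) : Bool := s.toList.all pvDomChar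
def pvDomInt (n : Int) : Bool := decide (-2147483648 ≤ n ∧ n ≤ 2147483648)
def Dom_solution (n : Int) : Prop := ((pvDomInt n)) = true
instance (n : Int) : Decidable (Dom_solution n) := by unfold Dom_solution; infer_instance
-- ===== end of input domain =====

-- B replaces A's linear scan over range(1, n+1) with a binary search for the integer
-- square root on [1, n] (objective: faster, O(log n) vs O(n)).


-- ===== PORT A =====
-- the for-loop with break: first i in the list with i*i == n, else the initial answer -1
def solutionLoop (n : Int) : List Int → Int
  | [] => -1
  | i :: rest => if i * i = n then i else solutionLoop n rest

def solution (n : Int) : Int :=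
  let answer := solutionLoop n (PySem.List.pyRange 1 (n + 1) 1)
  if answer ≠ -1 then (answer + 1) ^ 2 else answer

-- ===== PORT B =====
-- binary search on [low, high] for mid with mid*mid = n
def bsearch (n low high : Int) : Int :=
  if _h : low ≤ high then
    let mid := PySem.Int.floordiv (low + high) 2
    if mid * mid = n then (mid + 1) ^ 2
    else if mid * mid < n then bsearch n (mid + 1) high
    else bsearch n low (mid - 1)
  else -1
termination_by (high + 1 - low).toNat
decreasing_by
  · have := PySem.Int.floordiv_two_mid_bounds _h
    omega
  · have := PySem.Int.floordiv_two_mid_bounds _h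
    omega

def solution_alt (n : Int) : Int :=
  if n < 1 then -1 else bsearch n 1 n

-- ===== PRECONDITION & SPEC =====
def Spec_solution (n : Int) (out : Int) : Prop := out = solution_alt n
instance (n : Int) (out : Int) : Decidable (Spec_solution n out) := by unfold Spec_solution; infer_instance

-- ===== CLAIM (what is proved, stated in full; the proofs are below) =====
def Claim_equal_solution : Prop := ∀ (n : Int), Dom_solution n → Spec_solution n (solution n)

-- ===== LEMMAS AND PROOFS =====

-- a positive integer square root is unique
theorem sqrt_unique {j r : Int} (hj : 1 ≤ j) (hr : 1 ≤ r) (h : j * j = r * r) : j = r := by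
  rcases mul_self_eq_mul_self_iff.mp h with h' | h' <;> omega

theorem solutionLoop_found {n r : Int} (hr : 1 ≤ r) (hrn : r * r = n) :
    ∀ l : List Int, r ∈ l → (∀ j ∈ l, 1 ≤ j) → solutionLoop n l = r := by
  intro l
  induction l with
  | nil => simp
  | cons i rest ih =>
    intro hmem hpos
    by_cases hi : i * i = n
    · have : i = r := sqrt_unique (hpos i (by simp)) hr (by rw [hi, hrn])
      simp only [solutionLoop]
      rw [if_pos hi, this]
    · have : r ∈ rest := by
        rcases List.mem_cons.mp hmem with h | h
        · exact absurd (h ▸ hrn) hi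
        · exact h
      simp [solutionLoop, hi]
      exact ih this (fun j hj => hpos j (List.mem_cons_of_mem _ hj))

theorem solutionLoop_none {n : Int} : ∀ l : List Int, (∀ j ∈ l, j * j ≠ n) →
    solutionLoop n l = -1 := by
  intro l
  induction l with
  | nil => intro _; rfl
  | cons i rest ih =>
    intro h
    simp only [solutionLoop]
    rw [if_neg (h i (by simp))]
    exact ih fun j hj => h j (List.mem_cons_of_mem _ hj)

theorem bsearch_none {n : Int} (hn : ∀ j : Int, 1 ≤ j → j * j ≠ n) :
    ∀ low high : Int, 1 ≤ low → bsearch n low high = -1 := by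
  intro low high
  induction low, high using bsearch.induct n with
  | case1 low high h mid hsq =>
    intro hlow
    have hb := PySem.Int.floordiv_two_mid_bounds h
    exact absurd hsq (hn mid (by omega))
  | case2 low high h mid hsq hlt ih =>
    intro hlow
    have hb := PySem.Int.floordiv_two_mid_bounds h
    rw [bsearch]
    simp only [h, dite_true]
    rw [if_neg hsq, if_pos hlt]
    exact ih (by omega)
  | case3 low high h mid hsq hlt ih =>
    intro hlow
    rw [bsearch]
    simp only [h, dite_true]
    rw [if_neg hsq, if_neg hlt]
    exact ih hlow
  | case4 low high h =>
    intro _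
    rw [bsearch]
    simp [h]

theorem bsearch_found {n r : Int} (hr : 1 ≤ r) (hrn : r * r = n) :
    ∀ low high : Int, 1 ≤ low → low ≤ r → r ≤ high → bsearch n low high = (r + 1) ^ 2 := by
  intro low high
  induction low, high using bsearch.induct n with
  | case1 low high h mid hsq =>
    intro hlow _ _
    have hb := PySem.Int.floordiv_two_mid_bounds h
    have : mid = r := sqrt_unique (by omega) hr (by rw [hsq, hrn])
    rw [bsearch]
    simp only [h, dite_true]
    rw [if_pos hsq, show PySem.Int.floordiv (low + high) 2 = r from this]
  | case2 low high h mid hsq hlt ih =>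
    intro hlow hlr hrh
    have hb := PySem.Int.floordiv_two_mid_bounds h
    have hmid1 : 1 ≤ mid := by omega
    have hmlt : mid < r := by
      by_contra hc
      push Not at hc
      have : r * r ≤ mid * mid := by nlinarith
      omega
    rw [bsearch]
    simp only [h, dite_true]
    rw [if_neg hsq, if_pos hlt]
    exact ih (by omega) (by omega) hrh
  | case3 low high h mid hsq hlt ih =>
    intro hlow hlr hrh
    have hb := PySem.Int.floordiv_two_mid_bounds h
    have hgt : n < mid * mid := by omega
    have hmlt : r < mid := by
      by_contra hc
      push Not at hc
      have : mid * mid ≤ r * r := by nlinarith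
      omega
    rw [bsearch]
    simp only [h, dite_true]
    rw [if_neg hsq, if_neg hlt]
    exact ih hlow hlr (by omega)
  | case4 low high h =>
    intro _ hlr hrh
    omega

-- ===== VERDICT (by name: the statement is the Claim_ definition above) =====
theorem solution_spec : Claim_equal_solution := by
  unfold Claim_equal_solution
  intro n _
  unfold Spec_solution
  by_cases hn1 : n < 1
  · have hL : solution n = -1 := by
      unfold solution
      rw [PySem.List.pyRange_one_eq_nil (by omega)]
      simp [solutionLoop]
    have hR : solution_alt n = -1 := by
      unfold solution_alt
      rw [if_pos hn1]
    rw [hL, hR]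
  · push Not at hn1
    by_cases hex : ∃ r : Int, 1 ≤ r ∧ r * r = n
    · obtain ⟨r, hr, hrn⟩ := hex
      have hrn' : r ≤ n := by nlinarith
      have hA : solutionLoop n (PySem.List.pyRange 1 (n + 1) 1) = r := by
        apply solutionLoop_found hr hrn
        · rw [PySem.List.mem_pyRange_one]; omega
        · intro j hj
          rw [PySem.List.mem_pyRange_one] at hj
          omega
      have hL : solution n = (r + 1) ^ 2 := by
        unfold solution
        simp only [hA]
        rw [if_pos (show r ≠ -1 by omega)]
      have hR : solution_alt n = (r + 1) ^ 2 := by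
        unfold solution_alt
        rw [if_neg (by omega)]
        exact bsearch_found hr hrn 1 n (by omega) hr hrn'
      rw [hL, hR]
    · push Not at hex
      have hA : solutionLoop n (PySem.List.pyRange 1 (n + 1) 1) = -1 := by
        apply solutionLoop_none
        intro j hj
        rw [PySem.List.mem_pyRange_one] at hj
        exact hex j (by omega)
      have hL : solution n = -1 := by
        unfold solution
        simp only [hA]
        simp
      have hR : solution_alt n = -1 := by
        unfold solution_alt
        rw [if_neg (by omega)]
        exact bsearch_none (fun j hj => hex j hj) 1 n (le_refl 1)
      rw [hL, hR]
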